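-- pv_equiv track=rewrite | github.com/MrBrantCode/unitest_baseline | mut_generate/mist_train_cf/cf_63484/solution.py | sort_fruits_veggies
-- ===== SOURCE A (Python) =====
-- def sort_fruits_veggies(mixed):
--     fruits = ["Grapefruit", "Apricot", "Fig", "Apple", "Banana", "Mango", "Orange"]
--     vegetables = ["Carrot", "Eggplant", "Broccoli", "Leek", "Zucchini", "Onion", "Tomato"]
--
--     fruit_list = [item for item in mixed if item.lower() in [f.lower() for f in fruits]]
--     veggie_list = [item for item in mixed if item.lower() in [v.lower() for v in vegetables]]
--
--     fruit_list.sort(key=str.lower)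
--     veggie_list.sort(key=str.lower)
--
--     return fruit_list + veggie_list
-- ===== SOURCE B (Python) =====
-- def sort_fruits_veggies(mixed):
--     fruit_set = {"grapefruit", "apricot", "fig", "apple", "banana", "mango", "orange"}
--     veggie_set = {"carrot", "eggplant", "broccoli", "leek", "zucchini", "onion", "tomato"}
--     fruits, veggies = [], []
--     for item in sorted(mixed, key=str.lower):
--         low = item.lower()
--         if low in fruit_set:
--             fruits.append(item)
--         elif low in veggie_set:
--             veggies.append(item)
--     return fruits + veggies
-- ===== Notes on version B (the rewrite author's own statement) =====
-- stated objective: faster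
-- what changed: B sorts the whole list once with key=str.lower and partitions the sorted list in a single pass using two precomputed lowercase membership sets, instead of A's two filter passes that rebuild and linearly scan a lowercased category list for every item, followed by two separate sorts.
import Mathlib
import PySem

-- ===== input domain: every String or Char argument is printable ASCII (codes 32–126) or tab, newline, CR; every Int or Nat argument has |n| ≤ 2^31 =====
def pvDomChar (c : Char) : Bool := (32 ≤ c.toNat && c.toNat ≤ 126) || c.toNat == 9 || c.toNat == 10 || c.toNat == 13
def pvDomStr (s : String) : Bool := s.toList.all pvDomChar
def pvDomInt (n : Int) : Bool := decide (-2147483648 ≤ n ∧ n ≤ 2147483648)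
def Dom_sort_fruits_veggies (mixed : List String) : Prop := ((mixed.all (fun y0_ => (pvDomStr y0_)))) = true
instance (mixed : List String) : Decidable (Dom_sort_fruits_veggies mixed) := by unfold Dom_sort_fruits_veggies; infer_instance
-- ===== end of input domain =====

-- B sorts the whole list once by lowercase key and splits it in a single pass over the
-- sorted list, instead of A's two filter passes followed by two separate sorts (same cost class, simpler shape).

-- ===== PORT A =====
def sort_fruits_veggies (mixed : List String) : List String :=
  let fruits : List String := ["Grapefruit", "Apricot", "Fig", "Apple", "Banana", "Mango", "Orange"]
  let vegetables : List String := ["Carrot", "Eggplant", "Broccoli", "Leek", "Zucchini", "Onion", "Tomato"]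
  let fruit_list := mixed.filter (fun item => (fruits.map (fun f => PySem.Str.lower f)).contains (PySem.Str.lower item))
  let veggie_list := mixed.filter (fun item => (vegetables.map (fun v => PySem.Str.lower v)).contains (PySem.Str.lower item))
  PySem.List.sorted fruit_list PySem.Str.lower ++ PySem.List.sorted veggie_list PySem.Str.lower

-- ===== PORT B =====
def sort_fruits_veggies_alt (mixed : List String) : List String :=
  let fruit_set : PySem.Set String := PySem.Set.ofList ["grapefruit", "apricot", "fig", "apple", "banana", "mango", "orange"]
  let veggie_set : PySem.Set String := PySem.Set.ofList ["carrot", "eggplant", "broccoli", "leek", "zucchini", "onion", "tomato"]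
  let r := (PySem.List.sorted mixed PySem.Str.lower).foldl
    (fun (acc : List String × List String) item =>
      let low := PySem.Str.lower item
      if PySem.Set.contains fruit_set low then (acc.1 ++ [item], acc.2)
      else if PySem.Set.contains veggie_set low then (acc.1, acc.2 ++ [item])
      else acc)
    ([], [])
  r.1 ++ r.2

-- ===== PRECONDITION & SPEC =====
def Spec_sort_fruits_veggies (mixed : List String) (out : List String) : Prop := out = sort_fruits_veggies_alt mixed
instance (mixed : List String) (out : List String) : Decidable (Spec_sort_fruits_veggies mixed out) := by unfold Spec_sort_fruits_veggies; infer_instance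

-- ===== CLAIM (what is proved, stated in full; the proofs are below) =====
def Claim_equal_sort_fruits_veggies : Prop := ∀ (mixed : List String), Dom_sort_fruits_veggies mixed → Spec_sort_fruits_veggies mixed (sort_fruits_veggies mixed)

-- ===== LEMMAS AND PROOFS =====

-- insertBy puts x in front when it goes before every element
theorem insertBy_eq_cons_of_forall {α : Type} (b : α → α → Bool) (x : α) (zs : List α)
    (h : ∀ z ∈ zs, b x z = true) : PySem.List.insertBy b x zs = x :: zs := by
  cases zs with
  | nil => rfl
  | cons z t => simp [PySem.List.insertBy, h z (by simp)]

-- dropping a filtered-out inserted element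
theorem filter_insertBy_neg {α : Type} (b : α → α → Bool) (p : α → Bool) (x : α) (ys : List α)
    (hx : p x = false) : (PySem.List.insertBy b x ys).filter p = ys.filter p := by
  induction ys with
  | nil => simp [PySem.List.insertBy, hx]
  | cons y t ih =>
    by_cases hb : b x y
    · simp [PySem.List.insertBy, hb, hx]
    · simp [PySem.List.insertBy, hb, List.filter_cons, ih]

-- filter commutes with a stable insertion into a key-sorted list when the element is kept
theorem filter_insertBy_pos {α κ : Type} [LinearOrder κ] (key : α → κ) (p : α → Bool) (x : α) (ys : List α)
    (hx : p x = true) (hs : ys.Pairwise (fun a b => key a ≤ key b)) :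
    (PySem.List.insertBy (fun a b => decide (key a < key b)) x ys).filter p
      = PySem.List.insertBy (fun a b => decide (key a < key b)) x (ys.filter p) := by
  induction ys with
  | nil => simp [PySem.List.insertBy, hx]
  | cons y t ih =>
    rcases List.pairwise_cons.mp hs with ⟨hy, ht⟩
    by_cases hb : key x < key y
    · have hall : ∀ z ∈ (y :: t).filter p, (fun a b => decide (key a < key b)) x z = true := by
        intro z hz
        have hzm : z ∈ y :: t := List.mem_of_mem_filter hz
        have : key y ≤ key z := by
          rcases List.mem_cons.mp hzm with h | h
          · subst h; exact le_refl _
          · exact hy z h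
        simpa using lt_of_lt_of_le hb this
      rw [insertBy_eq_cons_of_forall (fun a b => decide (key a < key b)) x ((y :: t).filter p) hall]
      simp [PySem.List.insertBy, hb, List.filter_cons, hx]
    · by_cases hp : p y
      · simp [PySem.List.insertBy, hb, hp, ih ht]
      · simp [PySem.List.insertBy, hb, hp, ih ht]

-- filter commutes with the stable key-sort
theorem filter_sorted {α κ : Type} [LinearOrder κ] (key : α → κ) (p : α → Bool) (xs : List α) :
    (PySem.List.sorted xs key).filter p = PySem.List.sorted (xs.filter p) key := by
  induction xs using List.reverseRecOn with
  | nil => rfl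
  | append_singleton xs x ih =>
    have hsnoc : ∀ (l : List α), PySem.List.sorted (l ++ [x]) key
        = PySem.List.insertBy (fun a b => decide (key a < key b)) x (PySem.List.sorted l key) := by
      intro l
      rw [PySem.List.sorted_eq_foldl_insertBy, PySem.List.sorted_eq_foldl_insertBy, List.foldl_append]
      rfl
    rw [hsnoc]
    by_cases hp : p x
    · rw [filter_insertBy_pos key p x _ hp (PySem.List.sorted_pairwise xs key), ih,
        List.filter_append, ← hsnoc]
      simp [hp]
    · rw [filter_insertBy_neg _ p x _ (by simpa using hp), ih, List.filter_append]
      simp [hp]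

-- the single partition pass computes the two filters
theorem foldl_partition {α : Type} (pf pv : α → Bool) (s : List α) (f0 v0 : List α) :
    s.foldl (fun (acc : List α × List α) x =>
        if pf x then (acc.1 ++ [x], acc.2)
        else if pv x then (acc.1, acc.2 ++ [x]) else acc) (f0, v0)
      = (f0 ++ s.filter pf, v0 ++ s.filter (fun x => !pf x && pv x)) := by
  induction s generalizing f0 v0 with
  | nil => simp
  | cons x t ih =>
    by_cases hf : pf x
    · simp [List.foldl_cons, hf, ih]
    · by_cases hv : pv x
      · simp [List.foldl_cons, hf, hv, ih]
      · simp [List.foldl_cons, hf, hv, ih]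

-- no string lowercases into both category lists
theorem fruit_veggie_disjoint (s : String) :
    (["grapefruit", "apricot", "fig", "apple", "banana", "mango", "orange"].contains s) = true →
    (["carrot", "eggplant", "broccoli", "leek", "zucchini", "onion", "tomato"].contains s) = false := by
  intro h
  have hm : s ∈ ["grapefruit", "apricot", "fig", "apple", "banana", "mango", "orange"] := by
    simpa using h
  fin_cases hm <;> decide

theorem sort_fruits_veggies_spec_aux (mixed : List String) :
    sort_fruits_veggies mixed = sort_fruits_veggies_alt mixed := by
  have hF : (["Grapefruit", "Apricot", "Fig", "Apple", "Banana", "Mango", "Orange"].map (fun f => PySem.Str.lower f))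
      = ["grapefruit", "apricot", "fig", "apple", "banana", "mango", "orange"] := by decide
  have hV : (["Carrot", "Eggplant", "Broccoli", "Leek", "Zucchini", "Onion", "Tomato"].map (fun v => PySem.Str.lower v))
      = ["carrot", "eggplant", "broccoli", "leek", "zucchini", "onion", "tomato"] := by decide
  have hFs : PySem.Set.ofList ["grapefruit", "apricot", "fig", "apple", "banana", "mango", "orange"]
      = ["grapefruit", "apricot", "fig", "apple", "banana", "mango", "orange"] := by decide
  have hVs : PySem.Set.ofList ["carrot", "eggplant", "broccoli", "leek", "zucchini", "onion", "tomato"]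
      = ["carrot", "eggplant", "broccoli", "leek", "zucchini", "onion", "tomato"] := by decide
  unfold sort_fruits_veggies sort_fruits_veggies_alt
  simp only [hF, hV, hFs, hVs, PySem.Set.contains_eq_listContains]
  rw [foldl_partition]
  have hfilter :
      (PySem.List.sorted mixed PySem.Str.lower).filter
        (fun x => !(["grapefruit", "apricot", "fig", "apple", "banana", "mango", "orange"].contains (PySem.Str.lower x))
            && (["carrot", "eggplant", "broccoli", "leek", "zucchini", "onion", "tomato"].contains (PySem.Str.lower x)))
      = (PySem.List.sorted mixed PySem.Str.lower).filter
        (fun x => ["carrot", "eggplant", "broccoli", "leek", "zucchini", "onion", "tomato"].contains (PySem.Str.lower x)) := by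
    apply List.filter_congr
    intro x _
    by_cases hf : (["grapefruit", "apricot", "fig", "apple", "banana", "mango", "orange"].contains (PySem.Str.lower x)) = true
    · rw [hf, fruit_veggie_disjoint _ hf]
      rfl
    · rw [Bool.of_not_eq_true hf]
      simp
  simp only [List.nil_append, hfilter]
  rw [filter_sorted, filter_sorted]

-- ===== VERDICT (by name: the statement is the Claim_ definition above) =====
theorem sort_fruits_veggies_spec : Claim_equal_sort_fruits_veggies := by
  intro mixed _
  exact sort_fruits_veggies_spec_aux mixed
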